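-- pv_equiv track=rewrite | github.com/itsmemdtofik/Python | Arrays/Medium/MinIndicesToEqualEvenOddSum.py | minimumIndicesToEqualEvenOdd
-- ===== SOURCE A (Python) =====
-- def minimumIndicesToEqualEvenOdd(nums: list) -> list[int]:
--     n = len(nums)
--     count = 0
--
--     for i in range(n):
--
--         evenSum = oddSum = k = 0
--         for j in range(n):
--
--             if j == i:
--                 continue
--             if k % 2 == 0:
--                 evenSum += nums[j]
--             else:
--                 oddSum += nums[j]
--             k += 1
--         if evenSum == oddSum:
--             count += 1
--     return count
-- ===== SOURCE B (Python) =====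
-- def minimumIndicesToEqualEvenOdd(nums: list) -> list[int]:
--     totE = totO = 0
--     for i, x in enumerate(nums):
--         if i % 2 == 0:
--             totE += x
--         else:
--             totO += x
--     count = prefE = prefO = 0
--     for i, x in enumerate(nums):
--         if i % 2 == 0:
--             curE, curO = x, 0
--         else:
--             curE, curO = 0, x
--         if prefE + (totO - prefO - curO) == prefO + (totE - prefE - curE):
--             count += 1
--         prefE += curE
--         prefO += curO
--     return count
-- ===== Notes on version B (the rewrite author's own statement) =====
-- stated objective: faster
-- what changed: Replaces A's O(n^2) per-index re-scan (rebuilding the even/odd positional sums with index i skipped for every i) by one O(n) pass that keeps running prefix even/odd sums and derives the suffix sums from precomputed totals.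
import Mathlib
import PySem

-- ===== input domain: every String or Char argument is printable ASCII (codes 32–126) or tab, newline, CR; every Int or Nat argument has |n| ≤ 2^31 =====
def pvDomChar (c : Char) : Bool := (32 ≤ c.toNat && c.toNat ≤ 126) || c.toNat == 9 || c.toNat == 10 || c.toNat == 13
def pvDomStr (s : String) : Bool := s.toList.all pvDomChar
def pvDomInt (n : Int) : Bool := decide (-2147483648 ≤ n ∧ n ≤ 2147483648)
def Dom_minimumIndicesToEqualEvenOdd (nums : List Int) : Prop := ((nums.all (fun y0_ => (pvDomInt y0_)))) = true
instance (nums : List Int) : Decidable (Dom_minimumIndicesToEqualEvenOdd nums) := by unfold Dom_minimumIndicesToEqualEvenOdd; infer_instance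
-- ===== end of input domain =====

-- B replaces A's per-index re-scan (quadratic) by a single pass over running prefix
-- even/odd sums against precomputed totals; both ports are proved to return the same count.

-- ===== PORT A =====
def minimumIndicesToEqualEvenOdd (nums : List Int) : Int :=
  let n : Int := nums.length
  (PySem.List.pyRange 0 n 1).foldl (fun count i =>
    let inner := (PySem.List.pyRange 0 n 1).foldl
      (fun (st : Int × Int × Int) j =>
        if j == i then st
        else if st.2.2 % 2 == 0 then (st.1 + PySem.List.pyGetD nums j 0, st.2.1, st.2.2 + 1)
        else (st.1, st.2.1 + PySem.List.pyGetD nums j 0, st.2.2 + 1)) (0, 0, 0)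
    if inner.1 == inner.2.1 then count + 1 else count) 0

-- ===== PORT B =====
def minimumIndicesToEqualEvenOdd_alt (nums : List Int) : Int :=
  let tot := (PySem.List.enumerate nums).foldl
    (fun (t : Int × Int) p => if p.1 % 2 == 0 then (t.1 + p.2, t.2) else (t.1, t.2 + p.2)) (0, 0)
  let r := (PySem.List.enumerate nums).foldl
    (fun (st : Int × Int × Int) p =>
      let curE := if p.1 % 2 == 0 then p.2 else 0
      let curO := if p.1 % 2 == 0 then 0 else p.2
      ((if st.2.1 + (tot.2 - st.2.2 - curO) == st.2.2 + (tot.1 - st.2.1 - curE)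
        then st.1 + 1 else st.1), st.2.1 + curE, st.2.2 + curO)) (0, 0, 0)
  r.1

-- ===== PRECONDITION & SPEC =====
def Spec_minimumIndicesToEqualEvenOdd (nums : List Int) (out : Int) : Prop := out = minimumIndicesToEqualEvenOdd_alt nums
instance (nums : List Int) (out : Int) : Decidable (Spec_minimumIndicesToEqualEvenOdd nums out) := by unfold Spec_minimumIndicesToEqualEvenOdd; infer_instance

-- ===== CLAIM (what is proved, stated in full; the proofs are below) =====
def Claim_equal_minimumIndicesToEqualEvenOdd : Prop := ∀ (nums : List Int), Dom_minimumIndicesToEqualEvenOdd nums → Spec_minimumIndicesToEqualEvenOdd nums (minimumIndicesToEqualEvenOdd nums)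

-- ===== LEMMAS AND PROOFS =====

-- (altPair l).1 / (altPair l).2 = sums of l at even / odd positions
def altPair : List Int → Int × Int
  | [] => (0, 0)
  | x :: xs => (x + (altPair xs).2, (altPair xs).1)
lemma altPair_append (a b : List Int) :
    altPair (a ++ b) =
      if a.length % 2 = 0
      then ((altPair a).1 + (altPair b).1, (altPair a).2 + (altPair b).2)
      else ((altPair a).1 + (altPair b).2, (altPair a).2 + (altPair b).1) := by
  induction a with
  | nil => simp [altPair]
  | cons x t ih =>
    simp only [List.cons_append, altPair, ih, List.length_cons]
    by_cases h : t.length % 2 = 0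
    · have h1 : ¬ (t.length + 1) % 2 = 0 := by omega
      simp [h, h1, Prod.ext_iff]; ring
    · have h1 : (t.length + 1) % 2 = 0 := by omega
      simp [h, h1, Prod.ext_iff]; ring
def condAt (nums : List Int) (i : Nat) : Bool :=
  if i % 2 = 0
  then (altPair (nums.take i)).1 + (altPair (nums.drop (i+1))).1
        == (altPair (nums.take i)).2 + (altPair (nums.drop (i+1))).2
  else (altPair (nums.take i)).1 + (altPair (nums.drop (i+1))).2
        == (altPair (nums.take i)).2 + (altPair (nums.drop (i+1))).1
def astep (st : Int × Int × Int) (x : Int) : Int × Int × Int :=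
  if st.2.2 % 2 == 0 then (st.1 + x, st.2.1, st.2.2 + 1) else (st.1, st.2.1 + x, st.2.2 + 1)
lemma astep_fold (l : List Int) : ∀ (e o k : Int), 0 ≤ k →
    l.foldl astep (e, o, k) =
      (if k % 2 = 0
       then (e + (altPair l).1, o + (altPair l).2, k + l.length)
       else (e + (altPair l).2, o + (altPair l).1, k + l.length)) := by
  induction l with
  | nil => intro e o k hk; simp [altPair]
  | cons x t ih =>
    intro e o k hk
    rw [List.foldl_cons]
    by_cases h : k % 2 = 0
    · have h1 : ¬ ((k+1) % 2 = 0) := by omega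
      have ha : astep (e, o, k) x = (e + x, o, k + 1) := by simp [astep, h]
      rw [ha, ih _ _ _ (by omega), if_neg h1, if_pos h]
      refine Prod.ext (by simp [altPair]; try ring) (Prod.ext (by simp [altPair]; try ring) (by simp; try ring))
    · have h1 : (k+1) % 2 = 0 := by omega
      have ha : astep (e, o, k) x = (e, o + x, k + 1) := by simp [astep, h]
      rw [ha, ih _ _ _ (by omega), if_pos h1, if_neg h]
      refine Prod.ext (by simp [altPair]; try ring) (Prod.ext (by simp [altPair]; try ring) (by simp; try ring))

-- A: the inner loop over range(n) skipping index i
lemma inner_eq (nums : List Int) (i : Nat) (hi : i < nums.length) :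
    (PySem.List.pyRange 0 (nums.length : Int) 1).foldl
      (fun (st : Int × Int × Int) j =>
        if j == (i : Int) then st
        else if st.2.2 % 2 == 0 then (st.1 + PySem.List.pyGetD nums j 0, st.2.1, st.2.2 + 1)
        else (st.1, st.2.1 + PySem.List.pyGetD nums j 0, st.2.2 + 1)) (0, 0, 0)
    = (if i % 2 = 0
       then ((altPair (nums.take i)).1 + (altPair (nums.drop (i+1))).1,
             (altPair (nums.take i)).2 + (altPair (nums.drop (i+1))).2,
             (nums.length : Int) - 1)
       else ((altPair (nums.take i)).1 + (altPair (nums.drop (i+1))).2,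
             (altPair (nums.take i)).2 + (altPair (nums.drop (i+1))).1,
             (nums.length : Int) - 1)) := by
  have hsplit : PySem.List.pyRange 0 (nums.length : Int) 1
      = PySem.List.pyRange 0 (i : Int) 1 ++ PySem.List.pyRange (i : Int) ((i : Int)+1) 1
        ++ PySem.List.pyRange ((i : Int)+1) (nums.length : Int) 1 := by
    rw [List.append_assoc,
        ← PySem.List.pyRange_one_append ((i : Int)) ((i : Int)+1) ((nums.length : Int)) (by omega) (by omega),
        ← PySem.List.pyRange_one_append 0 ((i : Int)) ((nums.length : Int)) (by omega) (by omega)]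
  rw [hsplit, List.foldl_append, List.foldl_append]
  have hgetTake : ∀ (j : Int), 0 ≤ j → j < (i : Int) →
      PySem.List.pyGetD nums j 0 = PySem.List.pyGetD (nums.take i) j 0 := by
    intro j h0 hj
    rw [PySem.List.pyGetD_eq_getElem nums 0 h0 (by omega),
        PySem.List.pyGetD_eq_getElem (nums.take i) 0 h0 (by simp; omega),
        List.getElem_take]
  -- part 1
  have h1 : (PySem.List.pyRange 0 (i : Int) 1).foldl
      (fun (st : Int × Int × Int) j =>
        if j == (i : Int) then st
        else if st.2.2 % 2 == 0 then (st.1 + PySem.List.pyGetD nums j 0, st.2.1, st.2.2 + 1)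
        else (st.1, st.2.1 + PySem.List.pyGetD nums j 0, st.2.2 + 1)) (0, 0, 0)
      = ((altPair (nums.take i)).1, (altPair (nums.take i)).2, (i : Int)) := by
    have hc := PySem.List.foldl_congr_mem (PySem.List.pyRange 0 (i : Int) 1)
      (fun (st : Int × Int × Int) j =>
        if j == (i : Int) then st
        else if st.2.2 % 2 == 0 then (st.1 + PySem.List.pyGetD nums j 0, st.2.1, st.2.2 + 1)
        else (st.1, st.2.1 + PySem.List.pyGetD nums j 0, st.2.2 + 1))
      (fun (st : Int × Int × Int) j => astep st (PySem.List.pyGetD (nums.take i) j 0))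
      (0, 0, 0) ?_
    · rw [hc]
      have hlen : ((nums.take i).length : Int) = (i : Int) := by simp; omega
      rw [← hlen, PySem.List.foldl_pyRange_zero_pyGetD' (nums.take i) 0 astep (0,0,0)]
      rw [astep_fold _ _ _ _ (by omega)]
      simp
    · intro acc j hj
      rw [PySem.List.mem_pyRange_one] at hj
      have hne : ¬ (j == (i : Int)) := by simp; omega
      simp only [hne, Bool.false_eq_true, if_false, astep, hgetTake j hj.1 hj.2]
  rw [h1]
  -- part 2
  rw [PySem.List.pyRange_one_singleton]
  simp only [List.foldl_cons, List.foldl_nil, beq_self_eq_true, if_true]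
  -- part 3
  have hc2 := PySem.List.foldl_congr_mem (PySem.List.pyRange ((i : Int) + 1) (nums.length : Int) 1)
      (fun (st : Int × Int × Int) j =>
        if j == (i : Int) then st
        else if st.2.2 % 2 == 0 then (st.1 + PySem.List.pyGetD nums j 0, st.2.1, st.2.2 + 1)
        else (st.1, st.2.1 + PySem.List.pyGetD nums j 0, st.2.2 + 1))
      (fun (st : Int × Int × Int) j => astep st (PySem.List.pyGetD nums j 0))
      ((altPair (nums.take i)).1, (altPair (nums.take i)).2, (i : Int)) ?_
  · rw [hc2, PySem.List.foldl_pyRange_pyGetD' nums 0 astep _ (by omega)]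
    rw [astep_fold _ _ _ _ (by omega)]
    have hT : ((i : Int) + 1).toNat = i + 1 := by omega
    have hL : ((nums.drop (i+1)).length : Int) = (nums.length : Int) - (i : Int) - 1 := by
      simp; omega
    have hm : ((i : Int) % 2 = 0) ↔ (i % 2 = 0) := by omega
    by_cases hp : i % 2 = 0
    · rw [if_pos (hm.mpr hp), if_pos hp, hT]
      refine Prod.ext (by ring) (Prod.ext (by ring) ?_)
      simp only []
      omega
    · rw [if_neg (fun h => hp (hm.mp h)), if_neg hp, hT]
      refine Prod.ext (by ring) (Prod.ext (by ring) ?_)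
      simp only []
      omega
  · intro acc j hj
    rw [PySem.List.mem_pyRange_one] at hj
    have hne : ¬ (j == (i : Int)) := by simp; omega
    simp only [hne, Bool.false_eq_true, if_false, astep]

lemma A_eq (nums : List Int) :
    minimumIndicesToEqualEvenOdd nums = ((List.range nums.length).countP (condAt nums) : Int) := by
  unfold minimumIndicesToEqualEvenOdd
  dsimp only
  have hc := PySem.List.foldl_congr_mem (PySem.List.pyRange 0 (nums.length : Int) 1)
    (fun (count : Int) (i : Int) =>
      let inner := (PySem.List.pyRange 0 (nums.length : Int) 1).foldl
        (fun (st : Int × Int × Int) j =>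
          if j == i then st
          else if st.2.2 % 2 == 0 then (st.1 + PySem.List.pyGetD nums j 0, st.2.1, st.2.2 + 1)
          else (st.1, st.2.1 + PySem.List.pyGetD nums j 0, st.2.2 + 1)) (0, 0, 0)
      if inner.1 == inner.2.1 then count + 1 else count)
    (fun (count : Int) (i : Int) => if condAt nums i.toNat then count + 1 else count)
    0 ?_
  · rw [hc, PySem.List.pyRange_one, List.foldl_map]
    have h0 : ((nums.length : Int) - 0).toNat = nums.length := by omega
    rw [h0, PySem.List.foldl_if_add_one]
    simp
  · intro acc i hi
    rw [PySem.List.mem_pyRange_one] at hi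
    have hcast : i = ((i.toNat : Nat) : Int) := by omega
    have hlt : i.toNat < nums.length := by omega
    dsimp only
    rw [hcast, inner_eq nums i.toNat hlt]
    have hm : (max i 0) = i := by omega
    by_cases hp : i.toNat % 2 = 0 <;> simp [condAt, hp, hm]

lemma tot_fold (l : List Int) : ∀ (s : Nat) (e o : Int),
    (PySem.List.enumerate l (s : Int)).foldl
      (fun (t : Int × Int) p => if p.1 % 2 == 0 then (t.1 + p.2, t.2) else (t.1, t.2 + p.2)) (e, o)
    = (if s % 2 = 0 then (e + (altPair l).1, o + (altPair l).2)
       else (e + (altPair l).2, o + (altPair l).1)) := by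
  induction l with
  | nil => intro s e o; by_cases h : s % 2 = 0 <;> simp [PySem.List.enumerate, altPair, h]
  | cons x t ih =>
    intro s e o
    rw [PySem.List.enumerate_cons, List.foldl_cons]
    have hcast : (s : Int) + 1 = ((s + 1 : Nat) : Int) := by push_cast; ring
    by_cases h : s % 2 = 0
    · have hz : ((s : Int) % 2 == 0) = true := by simp; omega
      have h1 : ¬ (s + 1) % 2 = 0 := by omega
      simp only [hz, if_true, hcast]
      rw [ih (s+1), if_neg h1, if_pos h]
      simp [altPair, Prod.ext_iff]; ring
    · have hz : ((s : Int) % 2 == 0) = false := by simp; omega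
      have h1 : (s + 1) % 2 = 0 := by omega
      simp only [hz, Bool.false_eq_true, if_false, hcast]
      rw [ih (s+1), if_pos h1, if_neg h]
      simp [altPair, Prod.ext_iff]; ring

lemma b_fold (nums : List Int) (suf : List Int) : ∀ (pre : List Int), nums = pre ++ suf → ∀ (c : Int),
    (PySem.List.enumerate suf (pre.length : Int)).foldl
      (fun (st : Int × Int × Int) p =>
        let curE := if p.1 % 2 == 0 then p.2 else 0
        let curO := if p.1 % 2 == 0 then 0 else p.2
        ((if st.2.1 + ((altPair nums).2 - st.2.2 - curO) == st.2.2 + ((altPair nums).1 - st.2.1 - curE)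
          then st.1 + 1 else st.1), st.2.1 + curE, st.2.2 + curO))
      (c, (altPair pre).1, (altPair pre).2)
    = (c + ((List.range suf.length).countP (fun t => condAt nums (pre.length + t)) : Int),
       (altPair nums).1, (altPair nums).2) := by
  induction suf with
  | nil =>
    intro pre h c
    subst h
    simp [PySem.List.enumerate]
  | cons x rest ih =>
    intro pre h c
    rw [PySem.List.enumerate_cons, List.foldl_cons]
    have hpre : nums = (pre ++ [x]) ++ rest := by simp [h]
    have htake : nums.take pre.length = pre := by rw [h, List.take_left]
    have hdrop : nums.drop (pre.length + 1) = rest := by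
      rw [hpre]
      have hl : (pre ++ [x]).length = pre.length + 1 := by simp
      rw [← hl, List.drop_left]
    have hsplit := altPair_append pre (x :: rest)
    rw [← h] at hsplit
    have hpx : altPair (pre ++ [x]) =
        if pre.length % 2 = 0
        then ((altPair pre).1 + x, (altPair pre).2)
        else ((altPair pre).1, (altPair pre).2 + x) := by
      rw [altPair_append pre [x]]
      by_cases hp : pre.length % 2 = 0 <;> simp [hp, altPair]
    have hz : (((pre.length : Int)) % 2 == 0) = decide (pre.length % 2 = 0) := by
      by_cases hp : pre.length % 2 = 0 <;> simp [hp] <;> omega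
    have hstep :
        (fun (st : Int × Int × Int) (p : Int × Int) =>
          let curE := if p.1 % 2 == 0 then p.2 else 0
          let curO := if p.1 % 2 == 0 then 0 else p.2
          ((if st.2.1 + ((altPair nums).2 - st.2.2 - curO) == st.2.2 + ((altPair nums).1 - st.2.1 - curE)
            then st.1 + 1 else st.1), st.2.1 + curE, st.2.2 + curO))
          (c, (altPair pre).1, (altPair pre).2) ((pre.length : Int), x)
        = ((if condAt nums pre.length then c + 1 else c),
           (altPair (pre ++ [x])).1, (altPair (pre ++ [x])).2) := by
      by_cases hp : pre.length % 2 = 0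
      · rw [if_pos hp] at hsplit
        have hb : ((altPair pre).1 + ((altPair nums).2 - (altPair pre).2 - 0)
              == (altPair pre).2 + ((altPair nums).1 - (altPair pre).1 - x))
            = condAt nums pre.length := by
          rw [Bool.eq_iff_iff]
          simp only [condAt, hp, if_pos, htake, hdrop, hsplit, altPair, beq_iff_eq]
          constructor <;> intro hh <;> omega
        dsimp only
        simp only [hz, hp, decide_true, hpx, if_pos, hb, add_zero]
      · rw [if_neg hp] at hsplit
        have hb : ((altPair pre).1 + ((altPair nums).2 - (altPair pre).2 - x)
              == (altPair pre).2 + ((altPair nums).1 - (altPair pre).1 - 0))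
            = condAt nums pre.length := by
          rw [Bool.eq_iff_iff]
          simp only [condAt, hp, if_false, htake, hdrop, hsplit, altPair, beq_iff_eq]
          constructor <;> intro hh <;> omega
        dsimp only
        simp only [hz, hp, decide_false, Bool.false_eq_true, if_false, hpx, hb, add_zero]
    dsimp only at hstep ⊢
    rw [hstep]
    have hlen1 : ((pre.length : Int) + 1) = (((pre ++ [x]).length : Nat) : Int) := by
      simp
    rw [hlen1, ih (pre ++ [x]) hpre _]
    have hcnt : (List.range (x :: rest).length).countP (fun t => condAt nums (pre.length + t))
        = (if condAt nums pre.length then 1 else 0)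
          + (List.range rest.length).countP (fun t => condAt nums ((pre ++ [x]).length + t)) := by
      simp only [List.length_cons, List.range_succ_eq_map, List.countP_cons, List.countP_map]
      have hf : ((fun t => condAt nums (pre.length + t)) ∘ Nat.succ)
          = (fun t => condAt nums ((pre ++ [x]).length + t)) := by
        funext t
        simp only [Function.comp]
        congr 1
        simp
        omega
      rw [hf]
      simp [Nat.add_comm]
    rw [hcnt]
    refine Prod.ext ?_ rfl
    dsimp only
    by_cases hcond : condAt nums pre.length <;> simp [hcond] <;> push_cast <;> try ring

lemma B_eq (nums : List Int) :
    minimumIndicesToEqualEvenOdd_alt nums = ((List.range nums.length).countP (condAt nums) : Int) := by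
  unfold minimumIndicesToEqualEvenOdd_alt
  dsimp only
  rw [show PySem.List.enumerate nums (0 : Int) = PySem.List.enumerate nums (((0 : Nat) : Int)) from rfl]
  rw [tot_fold nums 0 0 0, if_pos (by omega)]
  have hstart := b_fold nums nums [] (by simp) 0
  simp only [List.length_nil, Nat.cast_zero, altPair] at hstart
  simp only [Nat.cast_zero, zero_add] at hstart ⊢
  rw [hstart]

-- ===== VERDICT (by name: the statement is the Claim_ definition above) =====
theorem minimumIndicesToEqualEvenOdd_spec : Claim_equal_minimumIndicesToEqualEvenOdd := by
  intro nums _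
  show _ = _
  rw [A_eq, B_eq]
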